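-- pv_equiv track=rewrite | github.com/AnimeLord-Bots/FileStore | plugins/link_generator.py | to_small_caps_with_html
-- ===== SOURCE A (Python) =====
-- SMALL_CAPS = {
--     'a': 'ᴀ', 'b': 'ʙ', 'c': 'ᴄ', 'd': 'ᴅ', 'e': 'ᴇ', 'f': 'ꜰ', 'g': 'ɢ', 'h': 'ʜ',
--     'i': 'ɪ', 'j': 'ᴊ', 'k': 'ᴋ', 'l': 'ʟ', 'm': 'ᴍ', 'n': 'ɴ', 'o': 'ᴏ', 'p': 'ᴘ',
--     'q': 'Q', 'r': 'ʀ', 's': 'ꜱ', 't': 'ᴛ', 'u': 'ᴜ', 'v': 'ᴠ', 'w': 'ᴡ', 'x': 'x',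
--     'y': 'ʏ', 'z': 'ᴢ'
-- }
--
-- def to_small_caps_with_html(text: str) -> str:
--     """Convert text to small caps font style while preserving HTML tags."""
--     result = ""
--     i = 0
--     while i < len(text):
--         if text[i] == '<':
--             # Find the closing '>' of the HTML tag
--             j = i + 1
--             while j < len(text) and text[j] != '>':
--                 j += 1
--             if j < len(text):
--                 # Include the HTML tag as is
--                 result += text[i:j+1]
--                 i = j + 1
--             else:
--                 # Incomplete tag, treat as normal text
--                 result += text[i]
--                 i += 1
--         else:
--             # Convert non-tag character to small caps
--             result += SMALL_CAPS.get(text[i].lower(), text[i])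
--             i += 1
--     return result
-- ===== SOURCE B (Python) =====
-- SMALL_CAPS = {
--     'a': 'ᴀ', 'b': 'ʙ', 'c': 'ᴄ', 'd': 'ᴅ', 'e': 'ᴇ', 'f': 'ꜰ', 'g': 'ɢ', 'h': 'ʜ',
--     'i': 'ɪ', 'j': 'ᴊ', 'k': 'ᴋ', 'l': 'ʟ', 'm': 'ᴍ', 'n': 'ɴ', 'o': 'ᴏ', 'p': 'ᴘ',
--     'q': 'Q', 'r': 'ʀ', 's': 'ꜱ', 't': 'ᴛ', 'u': 'ᴜ', 'v': 'ᴠ', 'w': 'ᴡ', 'x': 'x',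
--     'y': 'ʏ', 'z': 'ᴢ'
-- }
--
-- def to_small_caps_with_html(text: str) -> str:
--     # Tokenize into alternating (segment, is_tag) pieces using str.find,
--     # then convert only the non-tag segments and join.
--     tokens = []
--     pos = 0
--     while True:
--         lt = text.find('<', pos)
--         gt = text.find('>', lt + 1) if lt != -1 else -1
--         if lt == -1 or gt == -1:
--             tokens.append((text[pos:], False))
--             break
--         tokens.append((text[pos:lt], False))
--         tokens.append((text[lt:gt + 1], True))
--         pos = gt + 1
--     return ''.join(seg if is_tag else
--                    ''.join(SMALL_CAPS.get(c.lower(), c) for c in seg)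
--                    for seg, is_tag in tokens)
-- ===== Notes on version B (the rewrite author's own statement) =====
-- stated objective: faster
-- what changed: Replaced the manual index-walking scanner that grows the result by repeated string concatenation with a tokenize-then-map pipeline: split the text once into alternating (segment, is_tag) tokens via str.find, convert only non-tag segments, and join once.
import Mathlib
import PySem

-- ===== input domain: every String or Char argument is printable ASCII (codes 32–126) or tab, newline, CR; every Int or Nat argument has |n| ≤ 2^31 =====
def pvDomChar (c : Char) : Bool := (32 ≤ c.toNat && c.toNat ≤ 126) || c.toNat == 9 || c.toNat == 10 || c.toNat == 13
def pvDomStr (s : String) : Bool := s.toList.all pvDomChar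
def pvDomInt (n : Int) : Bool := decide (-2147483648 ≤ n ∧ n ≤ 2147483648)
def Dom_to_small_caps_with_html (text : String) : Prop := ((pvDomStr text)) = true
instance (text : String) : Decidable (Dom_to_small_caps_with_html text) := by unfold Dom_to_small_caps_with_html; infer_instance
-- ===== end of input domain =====

-- B replaces A's index-walking scanner with repeated string concatenation by tokenize-then-map-then-join (measured faster: one join instead of quadratic +=).

-- shared module-level constant SMALL_CAPS.get(c.lower(), c), as a character map
def smallCap (c : Char) : Char :=
  match PySem.Chars.lowerChar c with
  | 'a' => 'ᴀ' | 'b' => 'ʙ' | 'c' => 'ᴄ' | 'd' => 'ᴅ' | 'e' => 'ᴇ' | 'f' => 'ꜰ'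
  | 'g' => 'ɢ' | 'h' => 'ʜ' | 'i' => 'ɪ' | 'j' => 'ᴊ' | 'k' => 'ᴋ' | 'l' => 'ʟ'
  | 'm' => 'ᴍ' | 'n' => 'ɴ' | 'o' => 'ᴏ' | 'p' => 'ᴘ' | 'q' => 'Q' | 'r' => 'ʀ'
  | 's' => 'ꜱ' | 't' => 'ᴛ' | 'u' => 'ᴜ' | 'v' => 'ᴠ' | 'w' => 'ᴡ' | 'x' => 'x'
  | 'y' => 'ʏ' | 'z' => 'ᴢ'
  | _ => c

-- ===== PORT A =====
-- A's inner `while j < len(text) and text[j] != '>'` scan: returns the chars before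
-- the first '>' and the chars after it, or none if there is no '>'.
def splitGt : List Char → Option (List Char × List Char)
  | [] => none
  | c :: rest =>
    if c = '>' then some ([], rest)
    else match splitGt rest with
         | none => none
         | some (inside, after) => some (c :: inside, after)

theorem splitGt_length : ∀ (cs i a : List Char), splitGt cs = some (i, a) → a.length < cs.length := by
  intro cs
  induction cs with
  | nil => intro i a h; simp [splitGt] at h
  | cons c rest ih =>
    intro i a h
    simp only [splitGt] at h
    split at h
    · cases h; simp
    · cases hr : splitGt rest with
      | none => rw [hr] at h; simp at h
      | some p =>
        rw [hr] at h
        obtain ⟨i', a'⟩ := p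
        simp at h
        have := ih i' a' hr
        simp [← h.2]
        omega

-- A's outer while-loop over the current suffix of the text
def goA (cs : List Char) : List Char :=
  match cs with
  | [] => []
  | c :: rest =>
    if c = '<' then
      match h : splitGt rest with
      | some (inside, after) => '<' :: (inside ++ '>' :: goA after)
      | none => c :: goA rest
    else smallCap c :: goA rest
termination_by cs.length
decreasing_by
  · have := splitGt_length rest inside after h; simp; omega
  · simp
  · simp

def to_small_caps_with_html (text : String) : String := String.ofList (goA text.toList)

-- ===== PORT B =====
-- tokenizer: the segment before the next '<', then the tag up to the first following '>';
-- if there is no '<' or no closing '>', the whole remainder is one text segment.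
def tokensB (cs : List Char) : List (List Char × Bool) :=
  match h : cs.dropWhile (· ≠ '<') with
  | [] => [(cs.takeWhile (· ≠ '<'), false)]
  | _ :: rest' =>
    match h2 : rest'.dropWhile (· ≠ '>') with
    | [] => [(cs, false)]
    | _ :: after =>
      (cs.takeWhile (· ≠ '<'), false)
        :: ('<' :: rest'.takeWhile (· ≠ '>') ++ ['>'], true)
        :: tokensB after
termination_by cs.length
decreasing_by
  have h1 := congrArg List.length h
  have h3 := congrArg List.length h2
  have l1 := List.length_dropWhile_le (fun c => decide (c ≠ '<')) cs
  have l2 := List.length_dropWhile_le (fun c => decide (c ≠ '>')) rest'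
  simp only [List.length_cons] at h1 h3
  omega

def to_small_caps_with_html_alt (text : String) : String :=
  String.ofList ((tokensB text.toList).flatMap
    (fun t => if t.2 then t.1 else t.1.map smallCap))

-- ===== PRECONDITION & SPEC =====
def Spec_to_small_caps_with_html (text : String) (out : String) : Prop := out = to_small_caps_with_html_alt text
instance (text : String) (out : String) : Decidable (Spec_to_small_caps_with_html text out) := by unfold Spec_to_small_caps_with_html; infer_instance

-- ===== CLAIM (what is proved, stated in full; the proofs are below) =====
def Claim_equal_to_small_caps_with_html : Prop := ∀ (text : String), Dom_to_small_caps_with_html text → Spec_to_small_caps_with_html text (to_small_caps_with_html text)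

-- ===== LEMMAS AND PROOFS =====

theorem smallCap_lt : smallCap '<' = '<' := by decide

-- characters before the first '<' are converted one by one by A's loop
theorem goA_no_lt (pre xs : List Char) (hp : ∀ c ∈ pre, c ≠ '<') :
    goA (pre ++ xs) = pre.map smallCap ++ goA xs := by
  induction pre with
  | nil => simp
  | cons c t ih =>
    have hc : c ≠ '<' := hp c (by simp)
    rw [List.cons_append, goA]
    simp only [if_neg hc]
    rw [ih (fun d hd => hp d (by simp [hd]))]
    simp

theorem splitGt_none (cs : List Char) (h : '>' ∉ cs) : splitGt cs = none := by
  induction cs with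
  | nil => rfl
  | cons c t ih =>
    simp at h
    have hc : ¬ c = '>' := fun hh => h.1 hh.symm
    simp [splitGt, hc, ih h.2]

-- a remainder with no '>' is converted character-wise by A's loop (smallCap '<' = '<')
theorem goA_nil : goA [] = [] := by rw [goA]

theorem goA_no_gt (cs : List Char) (h : '>' ∉ cs) : goA cs = cs.map smallCap := by
  induction cs with
  | nil => simp [goA_nil]
  | cons c t ih =>
    simp at h
    rw [goA]
    by_cases hc : c = '<'
    · subst hc
      rw [if_pos rfl, splitGt_none t h.2, ih h.2, List.map_cons, smallCap_lt]
    · rw [if_neg hc, ih h.2]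
      rfl

theorem dropWhile_head {p : Char → Bool} : ∀ (l : List Char) (x : Char) (xs : List Char),
    List.dropWhile p l = x :: xs → p x = false := by
  intro l
  induction l with
  | nil => intro x xs h; simp [List.dropWhile] at h
  | cons c t ih =>
    intro x xs h
    rw [List.dropWhile_cons] at h
    split at h
    · exact ih x xs h
    · cases h; simpa using ‹¬ p c = true›

theorem splitGt_eq_span : ∀ (cs : List Char),
    splitGt cs = match cs.dropWhile (· ≠ '>') with
      | [] => none
      | _ :: a => some (cs.takeWhile (· ≠ '>'), a) := by
  intro cs
  induction cs with
  | nil => rfl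
  | cons c t ih =>
    by_cases hc : c = '>'
    · subst hc
      simp [splitGt]
    · rw [List.dropWhile_cons, List.takeWhile_cons]
      simp only [splitGt, if_neg hc, ih]
      have hdec : (decide (c ≠ '>')) = true := by simp [hc]
      rw [if_pos (by simp [hc]), if_pos (by simp [hc])]
      cases hd : t.dropWhile (· ≠ '>') <;> simp

theorem main_aux : ∀ (n : Nat) (cs : List Char), cs.length ≤ n →
    goA cs = (tokensB cs).flatMap (fun t => if t.2 then t.1 else t.1.map smallCap) := by
  intro n
  induction n with
  | zero =>
    intro cs hcs
    have hcs0 : cs = [] := List.eq_nil_of_length_eq_zero (Nat.le_zero.mp hcs)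
    subst hcs0
    rw [tokensB.eq_def]
    simp [goA_nil]
  | succ n ih =>
    intro cs hcs
    have hsplit := List.takeWhile_append_dropWhile (p := fun c => decide (c ≠ '<')) (l := cs)
    have hpre : ∀ c ∈ cs.takeWhile (· ≠ '<'), c ≠ '<' := by
      intro c hc
      have := List.mem_takeWhile_imp hc
      simpa using this
    rw [tokensB.eq_def]
    split
    · rename_i hr
      -- no '<' in the text: every char is converted
      conv_lhs => rw [← hsplit, hr]
      rw [goA_no_lt _ [] hpre, goA_nil]
      simp
    · rename_i r0 rest' hr
      have hr0 : r0 = '<' := by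
        have := dropWhile_head cs r0 rest' hr
        simpa using this
      subst hr0
      conv_lhs => rw [← hsplit, hr]
      rw [goA_no_lt _ _ hpre]
      split
      · rename_i h2
        -- unterminated '<': whole remainder is plain text
        have hng : '>' ∉ rest' := by
          have := List.dropWhile_eq_nil_iff.mp h2
          intro hm
          have := this _ hm
          simp at this
        rw [goA, if_pos rfl, splitGt_none rest' hng, goA_no_gt rest' hng]
        simp only [List.flatMap_cons, List.flatMap_nil]
        conv_rhs => rw [← hsplit, hr]
        simp [smallCap_lt]
      · rename_i g after h2
        have hg : g = '>' := by
          have := dropWhile_head rest' g after h2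
          simpa using this
        subst hg
        have h1 := congrArg List.length hr
        have h3 := congrArg List.length h2
        have l1 := List.length_dropWhile_le (fun c => decide (c ≠ '<')) cs
        have l2 := List.length_dropWhile_le (fun c => decide (c ≠ '>')) rest'
        simp only [List.length_cons] at h1 h3
        rw [goA, if_pos rfl]
        have hsg : splitGt rest' = some (rest'.takeWhile (· ≠ '>'), after) := by
          rw [splitGt_eq_span rest', h2]
        rw [hsg]
        simp [ih after (by omega)]

theorem main_equiv (cs : List Char) :
    goA cs = (tokensB cs).flatMap (fun t => if t.2 then t.1 else t.1.map smallCap) :=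
  main_aux cs.length cs le_rfl

-- ===== VERDICT (by name: the statement is the Claim_ definition above) =====
theorem to_small_caps_with_html_spec : Claim_equal_to_small_caps_with_html := by
  intro text _
  unfold Spec_to_small_caps_with_html to_small_caps_with_html to_small_caps_with_html_alt
  rw [main_equiv]
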